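-- pv_equiv track=rewrite | github.com/starcrown001/test_flashmask | benchmark_magiattention_cp.py | generate_causal_blockwise_mask
-- ===== SOURCE A (Python) =====
-- def seqlens2cu_seqlens(seqlens: list[int]) -> list[int]:
--     """transfer seqlens list to cu_seqlens, do not have check"""
--     cu_seqlens = [0]
--     for seqlen in seqlens:
--         cu_seqlens.append(cu_seqlens[-1] + seqlen)
--     return cu_seqlens
--
-- def generate_causal_blockwise_mask(doc_seq_lens=[2538, 1742, 3213]) -> tuple[list[list[int]], list[list[int]], list[bool]]:
--     """generate causal blockwise mask"""
--     seqlens = doc_seq_lens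
--     cu_seqlens = seqlens2cu_seqlens(seqlens)
--     total_seqlen = sum(seqlens)
--
--     q_ranges: list[list[int]] = []
--     k_ranges: list[list[int]] = []
--     for i in range(len(seqlens)):
--         q_ranges.append([cu_seqlens[i], cu_seqlens[i + 1]])
--         k_ranges.append([cu_seqlens[i], cu_seqlens[i + 1]])
--     k_ranges[-1] = [0, total_seqlen]
--
--     is_causal_mapping = [True] * len(seqlens)
--
--     return (q_ranges, k_ranges, is_causal_mapping)
-- ===== SOURCE B (Python) =====
-- def generate_causal_blockwise_mask(doc_seq_lens=[2538, 1742, 3213]) -> tuple[list[list[int]], list[list[int]], list[bool]]: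
--     """generate causal blockwise mask (built back-to-front from the total via suffix sums)"""
--     total = sum(doc_seq_lens)
--     rev: list[list[int]] = []
--     end = total
--     for seqlen in reversed(doc_seq_lens):
--         rev.append([end - seqlen, end])
--         end -= seqlen
--     q_ranges = list(reversed(rev))
--     k_ranges = q_ranges[:-1] + [[0, total]]
--     is_causal_mapping = [True] * len(doc_seq_lens)
--     return (q_ranges, k_ranges, is_causal_mapping)
-- ===== Notes on version B (the rewrite author's own statement) =====
-- stated objective: alternative
-- what changed: Instead of a cu_seqlens prefix-sum table driving an indexed forward pass, B computes the total once and builds the ranges back-to-front over reversed(doc_seq_lens) with a decrementing end (suffix sums), reverses the result, and forms k_ranges by slicing q_ranges[:-1] + [[0, total]] instead of an in-loop overwrite.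
import Mathlib
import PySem

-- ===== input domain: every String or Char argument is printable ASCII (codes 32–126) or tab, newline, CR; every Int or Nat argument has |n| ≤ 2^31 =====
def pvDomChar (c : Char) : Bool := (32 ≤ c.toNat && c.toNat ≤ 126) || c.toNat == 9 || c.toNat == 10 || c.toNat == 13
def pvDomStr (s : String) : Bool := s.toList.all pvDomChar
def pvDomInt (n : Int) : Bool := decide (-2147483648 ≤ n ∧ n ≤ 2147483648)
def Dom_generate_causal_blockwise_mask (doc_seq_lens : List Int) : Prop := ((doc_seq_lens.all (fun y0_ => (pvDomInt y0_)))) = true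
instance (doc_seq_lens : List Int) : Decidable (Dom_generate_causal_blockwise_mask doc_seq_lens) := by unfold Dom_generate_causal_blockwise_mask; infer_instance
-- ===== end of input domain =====

-- B builds the ranges back-to-front from the total via suffix sums and derives k_ranges by
-- slicing q_ranges[:-1], instead of A's cu_seqlens prefix table and indexed forward pass
-- (objective: alternative); A raises IndexError on the empty list (excluded by Pre_).


-- ===== PORT A =====
-- the last element of cu_seqlens is read with pyGetD (the list is never empty, so Python never raises here)
def seqlens2cu_seqlens (seqlens : List Int) : List Int :=
  seqlens.foldl (fun cu_seqlens seqlen => cu_seqlens ++ [PySem.List.pyGetD cu_seqlens (-1) 0 + seqlen]) [0]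

def generate_causal_blockwise_mask (doc_seq_lens : List Int) : List (List Int) × List (List Int) × List Bool :=
  let seqlens := doc_seq_lens
  let cu_seqlens := seqlens2cu_seqlens seqlens
  let total_seqlen := seqlens.sum
  let qk := (PySem.List.pyRange 0 (seqlens.length : Int) 1).foldl
    (fun (qk : List (List Int) × List (List Int)) i =>
      (qk.1 ++ [[PySem.List.pyGetD cu_seqlens i 0, PySem.List.pyGetD cu_seqlens (i + 1) 0]],
       qk.2 ++ [[PySem.List.pyGetD cu_seqlens i 0, PySem.List.pyGetD cu_seqlens (i + 1) 0]]))
    ([], [])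
  -- overwrite the last element of k_ranges (raises IndexError on empty input: excluded by Pre_)
  let k_ranges := qk.2.dropLast ++ [[0, total_seqlen]]
  (qk.1, k_ranges, List.replicate seqlens.length true)

-- ===== PORT B =====
def generate_causal_blockwise_mask_alt (doc_seq_lens : List Int) : List (List Int) × List (List Int) × List Bool :=
  let total := doc_seq_lens.sum
  -- loop over reversed(doc_seq_lens) with a decrementing end
  let st := doc_seq_lens.reverse.foldl
    (fun (st : List (List Int) × Int) seqlen => (st.1 ++ [[st.2 - seqlen, st.2]], st.2 - seqlen))
    ([], total)
  let q_ranges := st.1.reverse                                   -- list(reversed(rev))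
  let k_ranges := PySem.List.slice q_ranges none (some (-1)) ++ [[0, total]]   -- q_ranges[:-1] + [[0, total]]
  (q_ranges, k_ranges, List.replicate doc_seq_lens.length true)

-- ===== PRECONDITION & SPEC =====
-- Pre_ excludes only the empty list, on which Python A raises IndexError overwriting the last k range.
def Pre_generate_causal_blockwise_mask (doc_seq_lens : List Int) : Prop := doc_seq_lens ≠ []
instance (doc_seq_lens : List Int) : Decidable (Pre_generate_causal_blockwise_mask doc_seq_lens) := by unfold Pre_generate_causal_blockwise_mask; infer_instance
def pvWitness_generate_causal_blockwise_mask : List Int := [2538, 1742, 3213]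

def Spec_generate_causal_blockwise_mask (doc_seq_lens : List Int) (out : List (List Int) × List (List Int) × List Bool) : Prop := out = generate_causal_blockwise_mask_alt doc_seq_lens
instance (doc_seq_lens : List Int) (out : List (List Int) × List (List Int) × List Bool) : Decidable (Spec_generate_causal_blockwise_mask doc_seq_lens out) := by unfold Spec_generate_causal_blockwise_mask; infer_instance

-- ===== CLAIM (what is proved, stated in full; the proofs are below) =====
def Claim_equal_generate_causal_blockwise_mask : Prop := ∀ (doc_seq_lens : List Int), Dom_generate_causal_blockwise_mask doc_seq_lens → Pre_generate_causal_blockwise_mask doc_seq_lens → Spec_generate_causal_blockwise_mask doc_seq_lens (generate_causal_blockwise_mask doc_seq_lens)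

-- ===== LEMMAS AND PROOFS =====

-- reference shapes: the per-document ranges starting at c, and the running prefix sums
def pvPairs (c : Int) : List Int → List (List Int)
  | [] => []
  | s :: t => [c, c + s] :: pvPairs (c + s) t

def pvScan (c : Int) : List Int → List Int
  | [] => []
  | s :: t => (c + s) :: pvScan (c + s) t

lemma cu_fold (l : List Int) : ∀ (acc : List Int) (c : Int),
    l.foldl (fun cu s => cu ++ [PySem.List.pyGetD cu (-1) 0 + s]) (acc ++ [c])
      = (acc ++ [c]) ++ pvScan c l := by
  induction l with
  | nil => simp [pvScan]
  | cons s t ih =>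
    intro acc c
    simp only [List.foldl_cons, PySem.List.pyGetD_neg_one_append_singleton, pvScan]
    have := ih (acc ++ [c]) (c + s)
    simpa using this

lemma cu_eq (l : List Int) : seqlens2cu_seqlens l = 0 :: pvScan 0 l := by
  have := cu_fold l [] 0
  simpa [seqlens2cu_seqlens] using this

lemma map_range_pairs (l : List Int) (c : Int) :
    (PySem.List.pyRange 0 (l.length : Int) 1).map
        (fun i => [PySem.List.pyGetD (c :: pvScan c l) i 0,
                   PySem.List.pyGetD (c :: pvScan c l) (i + 1) 0])
      = pvPairs c l := by
  induction l generalizing c with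
  | nil => simp [PySem.List.pyRange_one_eq_nil, pvPairs]
  | cons s t ih =>
    have h0 : (0 : Int) < ((s :: t).length : Int) := by
      simp only [List.length_cons]; positivity
    rw [PySem.List.pyRange_one_cons h0]
    have hn : ((((s :: t).length : Int) - (0 + 1)).toNat) = t.length := by simp
    have hr : PySem.List.pyRange (0 + 1) ((s :: t).length : Int) 1
        = (List.range t.length).map (fun (k : Nat) => (0 : Int) + 1 + (k : Int)) := by
      rw [PySem.List.pyRange_one, hn]
    rw [hr]
    simp only [List.map_cons, List.map_map, pvPairs]
    congr 1
    · simp only [pvScan]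
      norm_num [PySem.List.pyGetD_ofNat']
    · rw [← ih (c + s), PySem.List.pyRange_one]
      simp only [Int.sub_zero, Int.toNat_natCast, List.map_map]
      apply List.map_congr_left
      intro k _
      simp only [Function.comp, pvScan]
      have e1 : (0 : Int) + 1 + (k : Int) = ((k + 1 : Nat) : Int) := by push_cast; ring
      have e2 : (0 : Int) + 1 + (k : Int) + 1 = ((k + 2 : Nat) : Int) := by push_cast; ring
      have e3 : (0 : Int) + (k : Int) = ((k : Nat) : Int) := by ring
      have e4 : (0 : Int) + (k : Int) + 1 = ((k + 1 : Nat) : Int) := by push_cast; ring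
      rw [e2, e1, e4, e3, PySem.List.pyGetD_natCast, PySem.List.pyGetD_natCast,
          PySem.List.pyGetD_natCast, PySem.List.pyGetD_natCast]
      simp [List.getD]

lemma qk_fold (r : List Int) (f : Int → List Int) :
    ∀ (q k : List (List Int)),
    r.foldl (fun (qk : List (List Int) × List (List Int)) i =>
        (qk.1 ++ [f i], qk.2 ++ [f i])) (q, k)
      = (q ++ r.map f, k ++ r.map f) := by
  induction r with
  | nil => simp
  | cons i t ih =>
    intro q k
    simp only [List.foldl_cons, List.map_cons]
    rw [ih]
    simp

-- B's reversed loop with a decrementing end produces the pairs back-to-front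
lemma b_rev_fold (l : List Int) : ∀ (c : Int),
    l.reverse.foldl
        (fun (st : List (List Int) × Int) seqlen =>
          (st.1 ++ [[st.2 - seqlen, st.2]], st.2 - seqlen))
        ([], c + l.sum)
      = ((pvPairs c l).reverse, c) := by
  induction l with
  | nil => simp [pvPairs]
  | cons s t ih =>
    intro c
    have harith : c + (s :: t).sum = (c + s) + t.sum := by simp [List.sum_cons]; ring
    rw [List.reverse_cons, List.foldl_append, harith, ih (c + s)]
    simp [pvPairs]

-- ===== VERDICT (by name: the statement is the Claim_ definition above) =====
theorem generate_causal_blockwise_mask_spec : Claim_equal_generate_causal_blockwise_mask := by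
  intro l _ _
  unfold Spec_generate_causal_blockwise_mask
  simp only [generate_causal_blockwise_mask, generate_causal_blockwise_mask_alt]
  have hb := b_rev_fold l 0
  rw [zero_add] at hb
  rw [cu_eq, qk_fold _ (fun i => [PySem.List.pyGetD (0 :: pvScan 0 l) i 0,
        PySem.List.pyGetD (0 :: pvScan 0 l) (i + 1) 0]) [] [],
      map_range_pairs l 0, hb, List.reverse_reverse, PySem.List.slice_to_neg_one]
  simp
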